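-- pv_equiv track=rewrite | github.com/IriaiSan/Ene | nanobot/ene/social/trust.py | apply_time_gate
-- ===== SOURCE A (Python) =====
-- TIER_TIME_GATES: dict[str, int] = {
--     "stranger": 0,
--     "acquaintance": 3,
--     "familiar": 14,
--     "trusted": 60,
--     "inner_circle": 180,
-- }
--
-- TIER_ORDER: list[str] = [
--     "stranger",
--     "acquaintance",
--     "familiar",
--     "trusted",
--     "inner_circle",
-- ]
--
-- def apply_time_gate(tier: str, days_known: int) -> str:
--     """Cap tier based on minimum tenure requirement.
--
--     The score is preserved — only the displayed tier is capped.
--     This prevents speed-running trust.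
--     """
--     max_allowed_idx = 0
--     for t in TIER_ORDER:
--         if days_known >= TIER_TIME_GATES[t]:
--             max_allowed_idx = TIER_ORDER.index(t)
--     current_idx = TIER_ORDER.index(tier) if tier in TIER_ORDER else 0
--     if current_idx > max_allowed_idx:
--         return TIER_ORDER[max_allowed_idx]
--     return tier
-- ===== SOURCE B (Python) =====
-- TIER_ORDER = [
--     "stranger",
--     "acquaintance",
--     "familiar",
--     "trusted",
--     "inner_circle",
-- ]
--
-- # Gate thresholds in the same order as TIER_ORDER (sorted ascending).
-- GATE_VALUES = [0, 3, 14, 60, 180]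
--
--
-- def _bisect_right(a, x):
--     """Index where x would be inserted in sorted a (after equal elements)."""
--     lo, hi = 0, len(a)
--     while lo < hi:
--         mid = (lo + hi) // 2
--         if x < a[mid]:
--             hi = mid
--         else:
--             lo = mid + 1
--     return lo
--
--
-- def apply_time_gate(tier: str, days_known: int) -> str:
--     max_allowed_idx = max(0, _bisect_right(GATE_VALUES, days_known) - 1)
--     try:
--         current_idx = TIER_ORDER.index(tier)
--     except ValueError:
--         return tier  # unknown tiers pass through untouched
--     if current_idx > max_allowed_idx:
--         return TIER_ORDER[max_allowed_idx]
--     return tier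
-- ===== Notes on version B (the rewrite author's own statement) =====
-- stated objective: alternative
-- what changed: Replaces the linear scan over TIER_ORDER with repeated dict lookups and list.index calls by a binary search (bisect_right) over a precomputed sorted threshold list, and handles unknown tiers via a single index lookup instead of a membership test plus index.
import Mathlib
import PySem

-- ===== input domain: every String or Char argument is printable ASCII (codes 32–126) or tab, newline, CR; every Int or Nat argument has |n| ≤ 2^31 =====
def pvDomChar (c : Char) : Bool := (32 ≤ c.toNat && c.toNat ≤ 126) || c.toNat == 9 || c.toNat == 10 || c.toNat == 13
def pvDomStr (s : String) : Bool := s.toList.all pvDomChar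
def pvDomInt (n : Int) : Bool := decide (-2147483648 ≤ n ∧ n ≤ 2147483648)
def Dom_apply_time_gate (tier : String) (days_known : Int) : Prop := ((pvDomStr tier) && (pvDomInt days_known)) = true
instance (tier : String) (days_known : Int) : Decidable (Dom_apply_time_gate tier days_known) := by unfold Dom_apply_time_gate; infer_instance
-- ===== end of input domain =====

-- B replaces A's linear scan (with per-step dict lookups and list.index calls) by a binary search
-- over the sorted gate thresholds; alternative decomposition, not claimed faster.

-- ===== PORT A =====
def TIER_TIME_GATES : PySem.Dict String Int :=
  PySem.Dict.ofList [("stranger", 0), ("acquaintance", 3), ("familiar", 14), ("trusted", 60), ("inner_circle", 180)]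

def TIER_ORDER : List String :=
  ["stranger", "acquaintance", "familiar", "trusted", "inner_circle"]

def apply_time_gate (tier : String) (days_known : Int) : String :=
  -- the .getD defaults are never used: every t comes from TIER_ORDER, so the dict lookup and
  -- TIER_ORDER.index(t) always succeed, and max_allowed_idx is always a valid index — exact.
  let max_allowed_idx : Nat :=
    TIER_ORDER.foldl (fun acc t =>
      if days_known ≥ (PySem.Dict.get? TIER_TIME_GATES t).getD 0
      then (PySem.List.index? TIER_ORDER t).getD 0 else acc) 0
  let current_idx : Nat :=
    if tier ∈ TIER_ORDER then (PySem.List.index? TIER_ORDER tier).getD 0 else 0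
  if current_idx > max_allowed_idx then (PySem.List.pyGet? TIER_ORDER (max_allowed_idx : Int)).getD "" else tier

-- ===== PORT B =====
def TIER_ORDER_B : List String :=
  ["stranger", "acquaintance", "familiar", "trusted", "inner_circle"]

def GATE_VALUES : List Int := [0, 3, 14, 60, 180]

-- Source B's _bisect_right while-loop as recursion on (lo, hi); a.getD mid 0 is exact: mid < hi ≤ len(a).
def bisectRight (a : List Int) (x : Int) (lo hi : Nat) : Nat :=
  if h : lo < hi then
    let mid := (lo + hi) / 2
    if x < a.getD mid 0 then bisectRight a x lo mid else bisectRight a x (mid + 1) hi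
  else lo
termination_by hi - lo
decreasing_by all_goals omega

def apply_time_gate_alt (tier : String) (days_known : Int) : String :=
  let max_allowed_idx : Int := max 0 ((bisectRight GATE_VALUES days_known 0 GATE_VALUES.length : Int) - 1)
  -- the try/except around TIER_ORDER.index(tier) is the Option match on index?
  match PySem.List.index? TIER_ORDER_B tier with
  | none => tier
  | some current_idx =>
    if (current_idx : Int) > max_allowed_idx
    then (PySem.List.pyGet? TIER_ORDER_B max_allowed_idx).getD ""  -- index always in range — exact
    else tier

-- ===== PRECONDITION & SPEC =====
def Spec_apply_time_gate (tier : String) (days_known : Int) (out : String) : Prop := out = apply_time_gate_alt tier days_known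
instance (tier : String) (days_known : Int) (out : String) : Decidable (Spec_apply_time_gate tier days_known out) := by unfold Spec_apply_time_gate; infer_instance

-- ===== CLAIM (what is proved, stated in full; the proofs are below) =====
def Claim_equal_apply_time_gate : Prop := ∀ (tier : String) (days_known : Int), Dom_apply_time_gate tier days_known → Spec_apply_time_gate tier days_known (apply_time_gate tier days_known)

-- ===== LEMMAS AND PROOFS =====

-- A's loop computes the index of the last tier whose gate is met (gates are increasing).
lemma maxIdx_eval (d : Int) :
    TIER_ORDER.foldl (fun acc t =>
      if d ≥ (PySem.Dict.get? TIER_TIME_GATES t).getD 0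
      then (PySem.List.index? TIER_ORDER t).getD 0 else acc) 0
    = if d ≥ 180 then 4 else if d ≥ 60 then 3 else if d ≥ 14 then 2 else if d ≥ 3 then 1 else 0 := by
  have h0 : PySem.Dict.get? TIER_TIME_GATES "stranger" = some 0 := by decide
  have h1 : PySem.Dict.get? TIER_TIME_GATES "acquaintance" = some 3 := by decide
  have h2 : PySem.Dict.get? TIER_TIME_GATES "familiar" = some 14 := by decide
  have h3 : PySem.Dict.get? TIER_TIME_GATES "trusted" = some 60 := by decide
  have h4 : PySem.Dict.get? TIER_TIME_GATES "inner_circle" = some 180 := by decide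
  have i0 : PySem.List.index? ["stranger", "acquaintance", "familiar", "trusted", "inner_circle"] "stranger" = some 0 := by decide
  have i1 : PySem.List.index? ["stranger", "acquaintance", "familiar", "trusted", "inner_circle"] "acquaintance" = some 1 := by decide
  have i2 : PySem.List.index? ["stranger", "acquaintance", "familiar", "trusted", "inner_circle"] "familiar" = some 2 := by decide
  have i3 : PySem.List.index? ["stranger", "acquaintance", "familiar", "trusted", "inner_circle"] "trusted" = some 3 := by decide
  have i4 : PySem.List.index? ["stranger", "acquaintance", "familiar", "trusted", "inner_circle"] "inner_circle" = some 4 := by decide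
  simp only [TIER_ORDER, List.foldl, h0, h1, h2, h3, h4, i0, i1, i2, i3, i4, Option.getD_some]
  split_ifs <;> omega

-- B's binary search over the gate values, evaluated interval by interval.
lemma bisect_eval (d : Int) :
    bisectRight GATE_VALUES d 0 GATE_VALUES.length
    = if d ≥ 180 then 5 else if d ≥ 60 then 4 else if d ≥ 14 then 3 else if d ≥ 3 then 2 else if d ≥ 0 then 1 else 0 := by
  have e05 : bisectRight GATE_VALUES d 0 5 = if d < 14 then bisectRight GATE_VALUES d 0 2 else bisectRight GATE_VALUES d 3 5 := by
    rw [bisectRight]; norm_num [GATE_VALUES]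
  have e02 : bisectRight GATE_VALUES d 0 2 = if d < 3 then bisectRight GATE_VALUES d 0 1 else bisectRight GATE_VALUES d 2 2 := by
    rw [bisectRight]; norm_num [GATE_VALUES]
  have e01 : bisectRight GATE_VALUES d 0 1 = if d < 0 then bisectRight GATE_VALUES d 0 0 else bisectRight GATE_VALUES d 1 1 := by
    rw [bisectRight]; norm_num [GATE_VALUES]
  have e35 : bisectRight GATE_VALUES d 3 5 = if d < 180 then bisectRight GATE_VALUES d 3 4 else bisectRight GATE_VALUES d 5 5 := by
    rw [bisectRight]; norm_num [GATE_VALUES]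
  have e34 : bisectRight GATE_VALUES d 3 4 = if d < 60 then bisectRight GATE_VALUES d 3 3 else bisectRight GATE_VALUES d 4 4 := by
    rw [bisectRight]; norm_num [GATE_VALUES]
  have stop : ∀ k, bisectRight GATE_VALUES d k k = k := by intro k; rw [bisectRight]; simp
  show bisectRight GATE_VALUES d 0 5 = _
  rw [e05, e02, e01, e35, e34]
  simp only [stop]
  split_ifs <;> omega

-- ===== VERDICT (by name: the statement is the Claim_ definition above) =====
theorem apply_time_gate_spec : Claim_equal_apply_time_gate := by
  intro tier d _
  unfold Spec_apply_time_gate apply_time_gate apply_time_gate_alt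
  simp only [maxIdx_eval, bisect_eval]
  have hBA : TIER_ORDER_B = TIER_ORDER := rfl
  cases hidx : PySem.List.index? TIER_ORDER_B tier with
  | none =>
    have hnot : tier ∉ TIER_ORDER := by
      rw [← hBA]; exact (PySem.List.index?_eq_none_iff _ _).mp hidx
    simp only [if_neg hnot]
    split_ifs <;> first | rfl | omega
  | some k =>
    have hmem : tier ∈ TIER_ORDER := by
      rw [← hBA]
      have hs : (PySem.List.index? TIER_ORDER_B tier).isSome := by rw [hidx]; rfl
      exact (PySem.List.index?_isSome_iff _ _).mp hs
    have hA : PySem.List.index? TIER_ORDER tier = some k := by rw [← hBA]; exact hidx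
    simp only [if_pos hmem, hA, Option.getD_some]
    by_cases h180 : d ≥ 180 <;> by_cases h60 : d ≥ 60 <;> by_cases h14 : d ≥ 14 <;>
      by_cases h3 : d ≥ 3 <;> by_cases h0 : d ≥ 0 <;>
      simp only [h180, h60, h14, h3, h0, if_true, if_false] <;>
      first
        | omega
        | (norm_num; split_ifs <;> first | rfl | omega | decide)
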